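-- pv_equiv track=rewrite | github.com/Lidianacosta/trilha-back-end-python | curso/sets/duplicata.py | duplicatas
-- ===== SOURCE A (Python) =====
-- def duplicatas(lista):
--
--     qtd_repeticoes = len(lista) - len(set(lista))
--
--     if not qtd_repeticoes:
--         return 0, None
--
--     conjunto = set()
--
--     for pos, item in enumerate(lista):
--         conjunto.add(item)
--
--         if len(conjunto) != pos + 1:
--             return qtd_repeticoes, item
-- ===== SOURCE B (Python) =====
-- def duplicatas(lista):
--     seen = set()
--     count = 0
--     first = None
--     for item in lista:
--         if item in seen:
--             count += 1
--             if first is None: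
--                 first = item
--         else:
--             seen.add(item)
--     if count == 0:
--         return 0, None
--     return count, first
-- ===== Notes on version B (the rewrite author's own statement) =====
-- stated objective: simpler
-- what changed: One integrated pass with a seen-set, a duplicate counter and a first-repeat accumulator replaces A's separate set(lista) count computation plus a second early-exit detection loop.
import Mathlib
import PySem

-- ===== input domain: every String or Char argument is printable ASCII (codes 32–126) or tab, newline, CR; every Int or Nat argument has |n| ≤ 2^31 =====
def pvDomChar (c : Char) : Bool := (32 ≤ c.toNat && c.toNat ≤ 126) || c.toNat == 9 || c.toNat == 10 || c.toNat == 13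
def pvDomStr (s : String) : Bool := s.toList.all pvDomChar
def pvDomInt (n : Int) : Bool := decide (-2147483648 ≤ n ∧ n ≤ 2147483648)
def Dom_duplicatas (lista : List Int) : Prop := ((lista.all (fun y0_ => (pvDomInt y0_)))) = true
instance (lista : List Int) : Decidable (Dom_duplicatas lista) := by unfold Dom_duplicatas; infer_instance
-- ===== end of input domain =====

-- B replaces A's set(lista)-based count plus second detection loop by one integrated pass
-- maintaining a seen-set, a duplicate counter and the first repeated element (objective: simpler).


-- ===== PORT A =====
-- loop 'for pos, item in enumerate(lista): conjunto.add(item); if len(conjunto) != pos+1: return qtd, item'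
-- (the fallthrough '([], _, _)' is unreachable in A when qtd ≠ 0; Python would return None there)
def duplicatasLoopA (qtd : Int) : List Int → PySem.Set Int → Int → Int × Option Int
  | [], _, _ => (qtd, none)
  | item :: rest, conjunto, pos =>
    let conjunto' := PySem.Set.add conjunto item
    if (conjunto'.length : Int) ≠ pos + 1 then (qtd, some item)
    else duplicatasLoopA qtd rest conjunto' (pos + 1)

def duplicatas (lista : List Int) : Int × Option Int :=
  let qtd : Int := (lista.length : Int) - ((PySem.Set.ofList lista).length : Int)
  if qtd = 0 then (0, none)
  else duplicatasLoopA qtd lista PySem.Set.empty 0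

-- ===== PORT B =====
-- single pass: seen set, duplicate counter, first repeated element
def duplicatasLoopB : List Int → PySem.Set Int → Int → Option Int → Int × Option Int
  | [], _, count, first => if count = 0 then (0, none) else (count, first)
  | item :: rest, seen, count, first =>
    if PySem.Set.contains seen item then
      duplicatasLoopB rest seen (count + 1) (if first = none then some item else first)
    else
      duplicatasLoopB rest (PySem.Set.add seen item) count first

def duplicatas_alt (lista : List Int) : Int × Option Int :=
  duplicatasLoopB lista PySem.Set.empty 0 none

-- ===== PRECONDITION & SPEC =====
def Spec_duplicatas (lista : List Int) (out : Int × Option Int) : Prop := out = duplicatas_alt lista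
instance (lista : List Int) (out : Int × Option Int) : Decidable (Spec_duplicatas lista out) := by unfold Spec_duplicatas; infer_instance

-- ===== CLAIM (what is proved, stated in full; the proofs are below) =====
def Claim_equal_duplicatas : Prop := ∀ (lista : List Int), Dom_duplicatas lista → Spec_duplicatas lista (duplicatas lista)

-- ===== LEMMAS AND PROOFS =====

/-- number of occurrences in `xs` of an element already seen (in `s` or earlier in `xs`). -/
def dupCount : List Int → PySem.Set Int → Int
  | [], _ => 0
  | x :: xs, s => if PySem.Set.contains s x then 1 + dupCount xs s else dupCount xs (PySem.Set.add s x)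

/-- first element of `xs` already seen. -/
def firstDup : List Int → PySem.Set Int → Option Int
  | [], _ => none
  | x :: xs, s => if PySem.Set.contains s x then some x else firstDup xs (PySem.Set.add s x)

lemma loopB_eq (xs : List Int) : ∀ (s : PySem.Set Int) (c : Int) (f : Option Int),
    duplicatasLoopB xs s c f =
      if c + dupCount xs s = 0 then (0, none)
      else (c + dupCount xs s, f.orElse (fun _ => firstDup xs s)) := by
  induction xs with
  | nil => intro s c f; simp [duplicatasLoopB, dupCount, firstDup]
  | cons x xs ih =>
    intro s c f
    by_cases h : x ∈ s
    · have hc : PySem.Set.contains s x = true := (PySem.Set.contains_iff s x).mpr h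
      simp only [duplicatasLoopB, hc, if_pos, ih, dupCount, firstDup]
      cases f <;> simp <;> ring_nf
    · have hc : ¬ PySem.Set.contains s x = true := fun hm => h ((PySem.Set.contains_iff s x).mp hm)
      simp [duplicatasLoopB, ih, dupCount, firstDup, h]

lemma dupCount_eq_sub (xs : List Int) : ∀ (s : PySem.Set Int), s.Nodup →
    dupCount xs s = (xs.length : Int) - ((PySem.Set.update s xs).length : Int) + (s.length : Int) := by
  induction xs with
  | nil => intro s _; simp [dupCount, PySem.Set.update]
  | cons x xs ih =>
    intro s hs
    by_cases hx : x ∈ s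
    · have h : PySem.Set.contains s x = true := (PySem.Set.contains_iff s x).mpr hx
      have hadd : PySem.Set.add s x = s := PySem.Set.add_of_mem hx
      rw [dupCount, if_pos h, PySem.Set.update_cons, hadd, ih s hs]
      simp; ring
    · have h : ¬ PySem.Set.contains s x = true := fun hm => hx ((PySem.Set.contains_iff s x).mp hm)
      have hadd : PySem.Set.add s x = s ++ [x] := PySem.Set.add_of_not_mem hx
      have hnd : (PySem.Set.add s x).Nodup := PySem.Set.nodup_add s x hs
      rw [dupCount, if_neg h, PySem.Set.update_cons, ih _ hnd, hadd]
      simp; ring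

lemma loopA_eq (qtd : Int) (xs : List Int) : ∀ (s : PySem.Set Int) (pos : Int),
    s.Nodup → (s.length : Int) = pos →
    duplicatasLoopA qtd xs s pos = (qtd, firstDup xs s) := by
  induction xs with
  | nil => intro s pos _ _; simp [duplicatasLoopA, firstDup]
  | cons x xs ih =>
    intro s pos hs hlen
    by_cases hx : x ∈ s
    · have h : PySem.Set.contains s x = true := (PySem.Set.contains_iff s x).mpr hx
      have hadd : PySem.Set.add s x = s := PySem.Set.add_of_mem hx
      rw [duplicatasLoopA, firstDup, if_pos h]
      simp only [hadd]
      rw [if_pos (by omega)]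
    · have h : ¬ PySem.Set.contains s x = true := fun hm => hx ((PySem.Set.contains_iff s x).mp hm)
      have hadd : PySem.Set.add s x = s ++ [x] := PySem.Set.add_of_not_mem hx
      have hlen' : ((PySem.Set.add s x).length : Int) = pos + 1 := by
        rw [hadd]; simp; omega
      rw [duplicatasLoopA, firstDup, if_neg h]
      rw [if_neg (by omega), ih _ (pos + 1) (PySem.Set.nodup_add _ _ hs) hlen']

lemma ofList_eq_update_empty (xs : List Int) :
    PySem.Set.ofList xs = PySem.Set.update PySem.Set.empty xs := rfl

-- ===== VERDICT (by name: the statement is the Claim_ definition above) =====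
theorem duplicatas_spec : Claim_equal_duplicatas := by
  intro lista _
  unfold Spec_duplicatas duplicatas duplicatas_alt
  have hcount : dupCount lista PySem.Set.empty =
      (lista.length : Int) - ((PySem.Set.ofList lista).length : Int) := by
    rw [dupCount_eq_sub lista PySem.Set.empty (by simp [PySem.Set.empty]),
        ofList_eq_update_empty]
    simp [PySem.Set.empty]
  rw [loopB_eq]
  simp only [zero_add, hcount]
  by_cases hz : (lista.length : Int) - ((PySem.Set.ofList lista).length : Int) = 0
  · simp [hz]
  · rw [if_neg hz, if_neg hz,
        loopA_eq _ lista PySem.Set.empty 0 (by simp [PySem.Set.empty]) (by simp [PySem.Set.empty])]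
    simp [Option.orElse]
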